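-- pv_equiv track=rewrite | github.com/do0134/solostudy | algorithm/10월/1010/2sol.py | solution
-- ===== SOURCE A (Python) =====
-- from collections import deque
--
-- def correct_idx(arr):
--     min_r, min_c = int(1e9), int(1e9)
--     val = list()
--
--     for r, c in arr:
--         min_r = min(min_r, r)
--         min_c = min(min_c, c)
--
--     for r, c in arr:
--         nr = r - min_r
--         nc = c - min_c
--         val.append((nr, nc))
--     val.sort()
--     return val
--
-- def bfs(arr, ver):
--     n = len(arr)
--     v = [[0] * n for _ in range(n)]
--     val = list()
--
--     for i in range(n):
--         for j in range(n):
--             if arr[i][j] == ver and not v[i][j]: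
--                 q = deque()
--                 q.append((i, j))
--                 v[i][j] = 1
--                 new_val = [(i, j)]
--
--                 while q:
--                     cr, cc = q.popleft()
--                     for dr, dc in ((0, 1), (0, -1), (1, 0), (-1, 0)):
--                         nr, nc = cr + dr, cc + dc
--                         if 0 <= nr < n and 0 <= nc < n and not v[nr][nc] and arr[nr][nc] == ver:
--                             q.append((nr, nc))
--                             v[nr][nc] = 1
--                             new_val.append((nr, nc))
--                 correct_val = correct_idx(new_val)
--                 val.append(correct_val)
--
--     return val
--
-- def rotate(arr, n):
--     val = list()
--     for r, c in arr:
--         val.append((c, n - 1 - r))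
--     val = correct_idx(val)
--     return val
--
-- def is_valid(hole, block):
--     if len(hole) != len(block):
--         return False
--     for idx in hole:
--         if idx not in block:
--             return False
--
--     return True
--
-- def solution(game_board, table):
--     answer = 0
--     n = len(game_board)
--     blocks = bfs(table, 1)
--     holes = bfs(game_board, 0)
--     v = [0] * len(holes)
--     for block in blocks:
--         for i in range(len(holes)):
--             if not v[i]:
--                 hole = holes[i]
--                 val = hole
--                 flag = False
--                 for _ in range(4):
--                     val = rotate(val, n)
--                     if is_valid(val, block):
--                         answer += len(val)
--                         v[i] = 1
--                         flag = True
--                         break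
--                 if flag:
--                     break
--
--     return answer
-- ===== SOURCE B (Python) =====
-- # B: same bfs/correct_idx/rotate shape extraction, but the nested blocks×holes×4-rotation
-- # greedy scan is replaced by a dict index: each hole's 4 rotations are inserted once into a
-- # map rotation -> [hole indices]; each block then looks up its candidates directly.
-- from collections import deque
--
-- def correct_idx(arr):
--     min_r, min_c = int(1e9), int(1e9)
--     val = list()
--     for r, c in arr:
--         min_r = min(min_r, r)
--         min_c = min(min_c, c)
--     for r, c in arr:
--         val.append((r - min_r, c - min_c))
--     val.sort()
--     return val
--
-- def bfs(arr, ver):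
--     n = len(arr)
--     v = [[0] * n for _ in range(n)]
--     val = list()
--     for i in range(n):
--         for j in range(n):
--             if arr[i][j] == ver and not v[i][j]:
--                 q = deque()
--                 q.append((i, j))
--                 v[i][j] = 1
--                 new_val = [(i, j)]
--                 while q:
--                     cr, cc = q.popleft()
--                     for dr, dc in ((0, 1), (0, -1), (1, 0), (-1, 0)):
--                         nr, nc = cr + dr, cc + dc
--                         if 0 <= nr < n and 0 <= nc < n and not v[nr][nc] and arr[nr][nc] == ver:
--                             q.append((nr, nc))
--                             v[nr][nc] = 1
--                             new_val.append((nr, nc))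
--                 val.append(correct_idx(new_val))
--     return val
--
-- def rotate(arr, n):
--     val = list()
--     for r, c in arr:
--         val.append((c, n - 1 - r))
--     return correct_idx(val)
--
-- def solution(game_board, table):
--     n = len(game_board)
--     blocks = bfs(table, 1)
--     holes = bfs(game_board, 0)
--     index = {}
--     for i, hole in enumerate(holes):
--         val = hole
--         for _ in range(4):
--             val = rotate(val, n)
--             index.setdefault(tuple(val), []).append(i)
--     matched = set()
--     answer = 0
--     for block in blocks:
--         for i in index.get(tuple(block), []):
--             if i not in matched:
--                 matched.add(i)
--                 answer += len(block)
--                 break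
--     return answer
-- ===== Notes on version B (the rewrite author's own statement) =====
-- stated objective: alternative
-- what changed: Keeps bfs/correct_idx/rotate shape extraction but replaces A's nested blocks x holes x 4-rotation greedy scan (with an is_valid subset test per rotation) by a dict built once mapping each hole's four rotated shapes to the hole indices, so each block finds its candidate holes by a single lookup instead of rescanning and re-rotating every hole.
import Mathlib
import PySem

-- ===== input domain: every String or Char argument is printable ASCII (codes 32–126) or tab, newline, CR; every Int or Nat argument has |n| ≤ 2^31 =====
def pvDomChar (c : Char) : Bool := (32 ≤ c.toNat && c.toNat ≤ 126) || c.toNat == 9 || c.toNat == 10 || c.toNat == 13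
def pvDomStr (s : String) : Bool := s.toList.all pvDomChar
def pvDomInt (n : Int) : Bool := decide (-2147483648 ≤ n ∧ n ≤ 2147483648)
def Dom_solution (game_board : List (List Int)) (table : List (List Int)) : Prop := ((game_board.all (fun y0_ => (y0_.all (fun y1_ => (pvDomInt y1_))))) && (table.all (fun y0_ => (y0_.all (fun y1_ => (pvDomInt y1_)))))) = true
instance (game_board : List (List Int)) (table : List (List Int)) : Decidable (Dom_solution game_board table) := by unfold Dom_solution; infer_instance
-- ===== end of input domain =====

-- B replaces A's nested blocks×holes×4-rotation greedy scan by a dict index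
-- rotation-shape -> hole indices, built once; blocks then look up their candidates directly.

-- ===== PORT A =====
-- helpers shared by both Pythons (Source A and Source B contain identical correct_idx / bfs / rotate)

-- grid read m[r][c] / write m[r][c] = x; every use below is guarded 0 ≤ r,c < len, where getD/set are exact
def mget (m : List (List Int)) (r c : Int) : Int := (m.getD r.toNat []).getD c.toNat 0
def mset (m : List (List Int)) (r c : Int) (x : Int) : List (List Int) :=
  m.set r.toNat ((m.getD r.toNat []).set c.toNat x)

-- correct_idx: running-min loops with the 1e9 sentinel, translate, then val.sort()
-- (Python sorts int pairs lexicographically: key toLex)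
def correctIdx (arr : List (Int × Int)) : List (Int × Int) :=
  let minr := arr.foldl (fun m p => min m p.1) 1000000000
  let minc := arr.foldl (fun m p => min m p.2) 1000000000
  PySem.List.sorted (arr.map (fun p => (p.1 - minr, p.2 - minc))) (fun p => toLex p) false

def bfsDirs : List (Int × Int) := [(0, 1), (0, -1), (1, 0), (-1, 0)]

-- the `while q:` loop; fuel n*n bounds the number of popleft's (each popped cell was
-- enqueued when its visited flag flipped 0→1, which happens at most n*n times)
def bfsLoop (arr : List (List Int)) (ver : Int) (n : Int) :
    Nat → List (Int × Int) → List (List Int) → List (Int × Int) →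
    List (List Int) × List (Int × Int)
  | 0, _, v, acc => (v, acc)
  | _ + 1, [], v, acc => (v, acc)
  | f + 1, c :: q, v, acc =>
    let st := bfsDirs.foldl
      (fun (st : List (Int × Int) × List (List Int) × List (Int × Int)) d =>
        let nr := c.1 + d.1
        let nc := c.2 + d.2
        if 0 ≤ nr ∧ nr < n ∧ 0 ≤ nc ∧ nc < n ∧ mget st.2.1 nr nc = 0 ∧ mget arr nr nc = ver
        then (st.1 ++ [(nr, nc)], mset st.2.1 nr nc 1, st.2.2 ++ [(nr, nc)])
        else st) (q, v, acc)
    bfsLoop arr ver n f st.1 st.2.1 st.2.2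

def bfs (arr : List (List Int)) (ver : Int) : List (List (Int × Int)) :=
  let n : Int := (arr.length : Int)
  let v0 := List.replicate arr.length (List.replicate arr.length (0 : Int))
  ((PySem.List.pyRange 0 n 1).foldl (fun st i =>
    (PySem.List.pyRange 0 n 1).foldl
      (fun (st : List (List Int) × List (List (Int × Int))) j =>
        if mget arr i j = ver ∧ mget st.1 i j = 0 then
          let r := bfsLoop arr ver n (arr.length * arr.length) [(i, j)] (mset st.1 i j 1) [(i, j)]
          (r.1, st.2 ++ [correctIdx r.2])
        else st) st) (v0, [])).2

def rotateShape (arr : List (Int × Int)) (n : Int) : List (Int × Int) :=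
  correctIdx (arr.map (fun p => (p.2, n - 1 - p.1)))

-- A-only helpers
def isValid (hole block : List (Int × Int)) : Bool :=
  if hole.length ≠ block.length then false
  else hole.all (fun idx => block.contains idx)

-- A's inner `for _ in range(4): val = rotate(val, n); if is_valid(val, block): … break`
def tryRot (n : Int) (block : List (Int × Int)) : List (Int × Int) → Nat → Option (List (Int × Int))
  | _, 0 => none
  | val, k + 1 =>
    let v' := rotateShape val n
    if isValid v' block then some v' else tryRot n block v' k

-- A's `for i in range(len(holes)): if not v[i]: …` scan (holes and flags in lockstep)
def scanA (n : Int) (block : List (Int × Int)) :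
    List (List (Int × Int)) → List Int → Option (Int × List Int)
  | [], _ => none
  | _, [] => none
  | h :: hs, f :: fs =>
    if f = 0 then
      match tryRot n block h 4 with
      | some val => some ((val.length : Int), 1 :: fs)
      | none => (scanA n block hs fs).map (fun r => (r.1, f :: r.2))
    else (scanA n block hs fs).map (fun r => (r.1, f :: r.2))

def solution (game_board : List (List Int)) (table : List (List Int)) : Int :=
  let n : Int := (game_board.length : Int)
  let blocks := bfs table 1
  let holes := bfs game_board 0
  (blocks.foldl (fun (st : Int × List Int) block =>
    match scanA n block holes st.2 with
    | some r => (st.1 + r.1, r.2)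
    | none => st) (0, List.replicate holes.length 0)).1

-- ===== PORT B =====
-- Source B's `val = hole; for _ in range(4): val = rotate(val, n); index.setdefault(…).append(i)`
def addHole (n : Int) (d : PySem.Dict (List (Int × Int)) (List Int)) (i : Int)
    (hole : List (Int × Int)) : PySem.Dict (List (Int × Int)) (List Int) :=
  ((PySem.List.pyRange 0 4 1).foldl
    (fun (s : List (Int × Int) × PySem.Dict (List (Int × Int)) (List Int)) _ =>
      let v' := rotateShape s.1 n
      (v', s.2.modify v' [] (fun l => l ++ [i]))) (hole, d)).2

def buildIndex (n : Int) (holes : List (List (Int × Int))) :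
    PySem.Dict (List (Int × Int)) (List Int) :=
  (PySem.List.enumerate holes 0).foldl (fun d p => addHole n d p.1 p.2) PySem.Dict.empty

-- Source B's `for i in cands: if i not in matched: … break`
def scanB (matched : PySem.Set Int) : List Int → Option Int
  | [] => none
  | i :: rest => if PySem.Set.contains matched i then scanB matched rest else some i

def solution_alt (game_board : List (List Int)) (table : List (List Int)) : Int :=
  let n : Int := (game_board.length : Int)
  let blocks := bfs table 1
  let holes := bfs game_board 0
  let index := buildIndex n holes
  (blocks.foldl (fun (st : Int × PySem.Set Int) block =>
    match scanB st.2 (index.getD block []) with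
    | some i => (st.1 + (block.length : Int), PySem.Set.add st.2 i)
    | none => st) (0, PySem.Set.empty)).1

-- ===== PRECONDITION & SPEC =====
-- Pre_ excludes exactly the inputs where the Python A raises IndexError: bfs reads
-- arr[i][j] for all i, j < len(arr), so every row must be at least as long as the board.
def Pre_solution (game_board : List (List Int)) (table : List (List Int)) : Prop :=
  (∀ row ∈ game_board, game_board.length ≤ row.length) ∧
  (∀ row ∈ table, table.length ≤ row.length)
instance (game_board : List (List Int)) (table : List (List Int)) : Decidable (Pre_solution game_board table) := by unfold Pre_solution; infer_instance

def pvWitness_solution : List (List Int) × List (List Int) := ([[1, 0], [0, 1]], [[1, 0], [0, 1]])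

def Spec_solution (game_board : List (List Int)) (table : List (List Int)) (out : Int) : Prop := out = solution_alt game_board table
instance (game_board : List (List Int)) (table : List (List Int)) (out : Int) : Decidable (Spec_solution game_board table out) := by unfold Spec_solution; infer_instance

-- ===== CLAIM (what is proved, stated in full; the proofs are below) =====
def Claim_equal_solution : Prop := ∀ (game_board : List (List Int)) (table : List (List Int)), Dom_solution game_board table → Pre_solution game_board table → Spec_solution game_board table (solution game_board table)

-- ===== LEMMAS AND PROOFS =====

-- a strictly lex-sorted list of cells: what correct_idx produces on duplicate-free input
def GoodS (s : List (Int × Int)) : Prop := List.Pairwise (fun a b => toLex a < toLex b) s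

theorem goodS_nodup {s : List (Int × Int)} (h : GoodS s) : s.Nodup := by
  exact h.imp (fun {a b} hlt => by rintro rfl; exact lt_irrefl _ hlt)

theorem goodS_correctIdx (arr : List (Int × Int)) (h : arr.Nodup) : GoodS (correctIdx arr) := by
  unfold correctIdx GoodS
  have hinj : Function.Injective (fun p : Int × Int =>
      (p.1 - arr.foldl (fun m p => min m p.1) 1000000000,
       p.2 - arr.foldl (fun m p => min m p.2) 1000000000)) := by
    intro a b hab
    simp only [Prod.mk.injEq] at hab
    exact Prod.ext (by omega) (by omega)
  have hnd : ((arr.map fun p : Int × Int =>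
      (p.1 - arr.foldl (fun m p => min m p.1) 1000000000,
       p.2 - arr.foldl (fun m p => min m p.2) 1000000000))).Nodup := h.map hinj
  have hperm := PySem.List.sorted_perm (arr.map fun p : Int × Int =>
      (p.1 - arr.foldl (fun m p => min m p.1) 1000000000,
       p.2 - arr.foldl (fun m p => min m p.2) 1000000000)) (fun p => toLex p) false
  have hnd2 := hperm.nodup_iff.mpr hnd
  have hle := PySem.List.sorted_pairwise (arr.map fun p : Int × Int =>
      (p.1 - arr.foldl (fun m p => min m p.1) 1000000000,
       p.2 - arr.foldl (fun m p => min m p.2) 1000000000)) (fun p => toLex p)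
  exact (hle.and hnd2).imp (fun {a b} hab =>
    lt_of_le_of_ne hab.1 (by simpa using hab.2))

theorem goodS_rotate {s : List (Int × Int)} (n : Int) (h : GoodS s) : GoodS (rotateShape s n) := by
  unfold rotateShape
  apply goodS_correctIdx
  exact (goodS_nodup h).map (fun a b hab => by
    simp only [Prod.mk.injEq] at hab
    exact Prod.ext (by omega) (by omega))

-- generic fold invariant
theorem foldl_preserve {α β : Type} (P : β → Prop) (f : β → α → β) (l : List α) (init : β)
    (h0 : P init) (h : ∀ st a, a ∈ l → P st → P (f st a)) : P (l.foldl f init) := by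
  induction l generalizing init with
  | nil => exact h0
  | cons x xs ih =>
    exact ih (f init x) (h init x (List.mem_cons_self) h0)
      (fun st a ha => h st a (List.mem_cons_of_mem _ ha))

def WFv (v : List (List Int)) (n : Nat) : Prop := v.length = n ∧ ∀ row ∈ v, row.length = n
def InB (n : Nat) (p : Int × Int) : Prop := 0 ≤ p.1 ∧ p.1 < (n : Int) ∧ 0 ≤ p.2 ∧ p.2 < (n : Int)
def AccInv (n : Nat) (v : List (List Int)) (acc : List (Int × Int)) : Prop :=
  acc.Nodup ∧ ∀ p ∈ acc, InB n p ∧ mget v p.1 p.2 ≠ 0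

theorem wfv_mset {v : List (List Int)} {n : Nat} (h : WFv v n) {r : Int} (c : Int)
    (hr0 : 0 ≤ r) (hrn : r < (n : Int)) (x : Int) :
    WFv (mset v r c x) n := by
  obtain ⟨hl, hrows⟩ := h
  have hlt : r.toNat < v.length := by omega
  refine ⟨by simp [mset, hl], ?_⟩
  intro row hrow
  rcases List.mem_or_eq_of_mem_set hrow with hmem | rfl
  · exact hrows row hmem
  · rw [List.length_set, List.getD_eq_getElem _ _ hlt]
    exact hrows _ (List.getElem_mem hlt)

theorem mget_mset_self {v : List (List Int)} {n : Nat} (h : WFv v n) {r c : Int}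
    (hr : 0 ≤ r) (hr2 : r < (n : Int)) (hc : 0 ≤ c) (hc2 : c < (n : Int)) (x : Int) :
    mget (mset v r c x) r c = x := by
  obtain ⟨hl, hrows⟩ := h
  have hltr : r.toNat < v.length := by omega
  have hrowlen : (v.getD r.toNat []).length = n := by
    rw [List.getD_eq_getElem _ _ hltr]; exact hrows _ (List.getElem_mem hltr)
  have hltc : c.toNat < (v.getD r.toNat []).length := by omega
  unfold mget mset
  rw [show (v.set r.toNat ((v.getD r.toNat []).set c.toNat x)).getD r.toNat []
      = (v.getD r.toNat []).set c.toNat x by simp [List.getD, hltr]]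
  simp only [List.getD] at hltc ⊢
  simp [hltc]

theorem mget_mset_ne {v : List (List Int)} {n : Nat} (h : WFv v n) {r c r' c' : Int}
    (hb : InB n (r, c)) (hb' : InB n (r', c')) (hne : (r', c') ≠ (r, c)) (x : Int) :
    mget (mset v r c x) r' c' = mget v r' c' := by
  obtain ⟨hl, hrows⟩ := h
  obtain ⟨h1, h2, h3, h4⟩ := hb
  obtain ⟨h1', h2', h3', h4'⟩ := hb'
  simp only at h1 h2 h3 h4 h1' h2' h3' h4'
  have hltr : r.toNat < v.length := by omega
  have hltr' : r'.toNat < v.length := by omega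
  unfold mget mset
  by_cases hrr : r'.toNat = r.toNat
  · have hcc : c'.toNat ≠ c.toNat := by
      intro hcn
      exact hne (by refine Prod.ext ?_ ?_ <;> simp <;> omega)
    rw [hrr, show (v.set r.toNat ((v.getD r.toNat []).set c.toNat x)).getD r.toNat []
        = (v.getD r.toNat []).set c.toNat x by simp [List.getD, hltr]]
    simp [List.getD, List.getElem?_set_ne (fun hx => hcc hx.symm)]
  · rw [show (v.set r.toNat ((v.getD r.toNat []).set c.toNat x)).getD r'.toNat []
        = v.getD r'.toNat [] by
      simp only [List.getD]
      rw [List.getElem?_set_ne (fun hx => hrr hx.symm)]]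

theorem dirStep_inv (arr : List (List Int)) (ver : Int) (n : Nat) (c : Int × Int)
    (ds : List (Int × Int)) :
    ∀ (st : List (Int × Int) × List (List Int) × List (Int × Int)),
    WFv st.2.1 n → AccInv n st.2.1 st.2.2 →
    WFv (ds.foldl (fun (st : List (Int × Int) × List (List Int) × List (Int × Int)) d =>
        let nr := c.1 + d.1
        let nc := c.2 + d.2
        if 0 ≤ nr ∧ nr < (n : Int) ∧ 0 ≤ nc ∧ nc < (n : Int) ∧ mget st.2.1 nr nc = 0 ∧ mget arr nr nc = ver
        then (st.1 ++ [(nr, nc)], mset st.2.1 nr nc 1, st.2.2 ++ [(nr, nc)])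
        else st) st).2.1 n ∧
    AccInv n (ds.foldl (fun (st : List (Int × Int) × List (List Int) × List (Int × Int)) d =>
        let nr := c.1 + d.1
        let nc := c.2 + d.2
        if 0 ≤ nr ∧ nr < (n : Int) ∧ 0 ≤ nc ∧ nc < (n : Int) ∧ mget st.2.1 nr nc = 0 ∧ mget arr nr nc = ver
        then (st.1 ++ [(nr, nc)], mset st.2.1 nr nc 1, st.2.2 ++ [(nr, nc)])
        else st) st).2.1
      (ds.foldl (fun (st : List (Int × Int) × List (List Int) × List (Int × Int)) d =>
        let nr := c.1 + d.1
        let nc := c.2 + d.2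
        if 0 ≤ nr ∧ nr < (n : Int) ∧ 0 ≤ nc ∧ nc < (n : Int) ∧ mget st.2.1 nr nc = 0 ∧ mget arr nr nc = ver
        then (st.1 ++ [(nr, nc)], mset st.2.1 nr nc 1, st.2.2 ++ [(nr, nc)])
        else st) st).2.2 := by
  intro st hwf hacc
  refine foldl_preserve
    (fun (st : List (Int × Int) × List (List Int) × List (Int × Int)) =>
      WFv st.2.1 n ∧ AccInv n st.2.1 st.2.2)
    _ ds st ⟨hwf, hacc⟩ ?_
  intro st d _ hP
  obtain ⟨hwf', hnd', hmem'⟩ := hP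
  dsimp only
  split_ifs with hg
  · obtain ⟨g1, g2, g3, g4, g5, g6⟩ := hg
    have hInB : InB n (c.1 + d.1, c.2 + d.2) := ⟨g1, g2, g3, g4⟩
    have hnotmem : (c.1 + d.1, c.2 + d.2) ∉ st.2.2 := fun hm => (hmem' _ hm).2 g5
    refine ⟨wfv_mset hwf' _ g1 g2 _, ?_, ?_⟩
    · simp only [List.nodup_append, hnd', true_and]
      constructor
      · exact List.nodup_singleton _
      · intro a ha b hb
        simp only [List.mem_singleton] at hb
        subst hb
        exact fun he => hnotmem (he ▸ ha)
    · intro p hp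
      rcases List.mem_append.mp hp with hold | hnew
      · refine ⟨(hmem' p hold).1, ?_⟩
        rw [show p = (p.1, p.2) from rfl] at hold ⊢
        rw [mget_mset_ne hwf' hInB (hmem' _ hold).1
          (fun he => hnotmem (he ▸ hold)) 1]
        exact (hmem' _ hold).2
      · rw [List.mem_singleton.mp hnew]
        exact ⟨hInB, by rw [mget_mset_self hwf' g1 g2 g3 g4 1]; norm_num⟩
  · exact ⟨hwf', hnd', hmem'⟩

theorem bfsLoop_inv (arr : List (List Int)) (ver : Int) (n : Nat) (fuel : Nat) :
    ∀ (q : List (Int × Int)) (v : List (List Int)) (acc : List (Int × Int)),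
    WFv v n → AccInv n v acc →
    WFv (bfsLoop arr ver (n : Int) fuel q v acc).1 n ∧
    AccInv n (bfsLoop arr ver (n : Int) fuel q v acc).1 (bfsLoop arr ver (n : Int) fuel q v acc).2 := by
  induction fuel with
  | zero => intro q v acc hwf hacc; exact ⟨hwf, hacc⟩
  | succ f ih =>
    intro q v acc hwf hacc
    cases q with
    | nil => exact ⟨hwf, hacc⟩
    | cons c q =>
      rw [bfsLoop]
      have hstep := dirStep_inv arr ver n c bfsDirs (q, v, acc) hwf hacc
      exact ih _ _ _ hstep.1 hstep.2

theorem bfs_shapes (arr : List (List Int)) (ver : Int) :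
    ∀ s ∈ bfs arr ver, GoodS s := by
  unfold bfs
  intro s hs
  refine (foldl_preserve
    (fun (st : List (List Int) × List (List (Int × Int))) =>
      WFv st.1 arr.length ∧ ∀ s ∈ st.2, GoodS s)
    _ (PySem.List.pyRange 0 (arr.length : Int) 1)
    (List.replicate arr.length (List.replicate arr.length (0 : Int)), ([] : List (List (Int × Int))))
    ⟨⟨by simp, by intro row hrow; simp_all [List.eq_of_mem_replicate hrow]⟩, by simp⟩ ?_).2 s hs
  intro st i hi hP
  refine foldl_preserve
    (fun (st : List (List Int) × List (List (Int × Int))) =>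
      WFv st.1 arr.length ∧ ∀ s ∈ st.2, GoodS s)
    _ (PySem.List.pyRange 0 (arr.length : Int) 1) st hP ?_
  intro st j hj hP'
  obtain ⟨hwf, hout⟩ := hP'
  dsimp only
  split_ifs with hg
  · obtain ⟨hi1, hi2⟩ := (PySem.List.mem_pyRange_one).mp hi
    obtain ⟨hj1, hj2⟩ := (PySem.List.mem_pyRange_one).mp hj
    have hwf1 : WFv (mset st.1 i j 1) arr.length := wfv_mset hwf _ hi1 hi2 _
    have hacc1 : AccInv arr.length (mset st.1 i j 1) [(i, j)] := by
      refine ⟨List.nodup_singleton _, ?_⟩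
      intro p hp
      rw [List.mem_singleton.mp hp]
      refine ⟨⟨hi1, hi2, hj1, hj2⟩, ?_⟩
      rw [mget_mset_self hwf hi1 hi2 hj1 hj2 1]
      norm_num
    have hres := bfsLoop_inv arr ver arr.length (arr.length * arr.length)
      [(i, j)] (mset st.1 i j 1) [(i, j)] hwf1 hacc1
    refine ⟨hres.1, ?_⟩
    intro s hs
    rcases List.mem_append.mp hs with hold | hnew
    · exact hout s hold
    · rw [List.mem_singleton.mp hnew]
      exact goodS_correctIdx _ hres.2.1
  · exact ⟨hwf, hout⟩

theorem isValid_iff {hole block : List (Int × Int)} (hh : GoodS hole) (hb : GoodS block) :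
    isValid hole block = true ↔ hole = block := by
  constructor
  · intro hv
    unfold isValid at hv
    by_cases hlen : hole.length = block.length
    · rw [if_neg (by simp [hlen])] at hv
      have hsub : hole ⊆ block := by
        intro x hx
        have hx2 := List.all_eq_true.mp hv x hx
        simpa using hx2
      have hperm := ((goodS_nodup hh).subperm hsub).perm_of_length_le (le_of_eq hlen.symm)
      exact List.Perm.eq_of_pairwise
        (fun a b _ _ hab hba => absurd hba (lt_asymm hab)) hh hb hperm
    · rw [if_pos hlen] at hv
      cases hv
  · rintro rfl
    unfold isValid
    rw [if_neg (by simp)]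
    exact List.all_eq_true.mpr (fun x hx => by simpa using hx)

-- the four successive rotations Source B stores for a hole
def rots4 (n : Int) (h : List (Int × Int)) : List (List (Int × Int)) :=
  [rotateShape h n, rotateShape (rotateShape h n) n,
   rotateShape (rotateShape (rotateShape h n) n) n,
   rotateShape (rotateShape (rotateShape (rotateShape h n) n) n) n]

theorem tryRot_eq (n : Int) {block h : List (Int × Int)} (hb : GoodS block) (hh : GoodS h) :
    tryRot n block h 4 = if block ∈ rots4 n h then some block else none := by
  have hIV : ∀ v : List (Int × Int), GoodS v → isValid v block = decide (v = block) := by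
    intro v hv
    by_cases hvb : v = block
    · subst hvb
      simp only [decide_true]
      exact (isValid_iff hv hb).mpr rfl
    · simp only [hvb, decide_false]
      exact Bool.eq_false_iff.mpr (fun hy => hvb ((isValid_iff hv hb).mp hy))
  have g1 : GoodS (rotateShape h n) := goodS_rotate n hh
  have g2 : GoodS (rotateShape (rotateShape h n) n) := goodS_rotate n g1
  have g3 : GoodS (rotateShape (rotateShape (rotateShape h n) n) n) := goodS_rotate n g2
  have expand : tryRot n block h 4 =
      if rotateShape h n = block then some (rotateShape h n)
      else if rotateShape (rotateShape h n) n = block then some (rotateShape (rotateShape h n) n)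
      else if rotateShape (rotateShape (rotateShape h n) n) n = block then
        some (rotateShape (rotateShape (rotateShape h n) n) n)
      else if rotateShape (rotateShape (rotateShape (rotateShape h n) n) n) n = block then
        some (rotateShape (rotateShape (rotateShape (rotateShape h n) n) n) n)
      else none := by
    simp only [tryRot, hIV _ g1, hIV _ g2, hIV _ g3, hIV _ (goodS_rotate n g3),
      decide_eq_true_eq]
  rw [expand]
  by_cases e1 : rotateShape h n = block
  · rw [if_pos e1, e1, if_pos (show block ∈ rots4 n h from e1 ▸ List.mem_cons_self)]
  · rw [if_neg e1]
    by_cases e2 : rotateShape (rotateShape h n) n = block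
    · rw [if_pos e2, e2, if_pos (show block ∈ rots4 n h from
        e2 ▸ List.mem_cons_of_mem _ List.mem_cons_self)]
    · rw [if_neg e2]
      by_cases e3 : rotateShape (rotateShape (rotateShape h n) n) n = block
      · rw [if_pos e3, e3, if_pos (show block ∈ rots4 n h from
          e3 ▸ List.mem_cons_of_mem _ (List.mem_cons_of_mem _ List.mem_cons_self))]
      · rw [if_neg e3]
        by_cases e4 : rotateShape (rotateShape (rotateShape (rotateShape h n) n) n) n = block
        · rw [if_pos e4, e4, if_pos (show block ∈ rots4 n h from
            e4 ▸ List.mem_cons_of_mem _ (List.mem_cons_of_mem _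
              (List.mem_cons_of_mem _ List.mem_cons_self)))]
        · rw [if_neg e4, if_neg ?_]
          intro hmem
          rw [rots4] at hmem
          simp only [List.mem_cons, List.not_mem_nil, or_false] at hmem
          rcases hmem with h1 | h2 | h3 | h4
          · exact e1 h1.symm
          · exact e2 h2.symm
          · exact e3 h3.symm
          · exact e4 h4.symm

def candFlat (n : Int) (hs : List (List (Int × Int))) (s : Int) (b : List (Int × Int)) : List Int :=
  (PySem.List.enumerate hs s).flatMap
    (fun p => (((rots4 n p.2).filter (fun v => v == b)).map (fun _ => p.1)))

theorem addHole_eq (n : Int) (d : PySem.Dict (List (Int × Int)) (List Int)) (i : Int)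
    (h : List (Int × Int)) :
    addHole n d i h = (rots4 n h).foldl (fun d v => d.modify v [] (fun l => l ++ [i])) d := by
  rfl

theorem getD_fold_addHole (n : Int) (b : List (Int × Int)) :
    ∀ (l : List (Int × List (Int × Int))) (d : PySem.Dict (List (Int × Int)) (List Int)),
    (l.foldl (fun d p => addHole n d p.1 p.2) d).getD b [] =
    d.getD b [] ++ l.flatMap (fun p => ((rots4 n p.2).filter (fun v => v == b)).map (fun _ => p.1)) := by
  intro l
  induction l with
  | nil => intro d; simp
  | cons p l ih =>
    intro d
    rw [List.foldl_cons, ih, List.flatMap_cons, addHole_eq]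
    rw [show ((rots4 n p.2).foldl (fun d v => d.modify v [] (fun l => l ++ [p.1])) d)
        = (((rots4 n p.2).map (fun v => (v, p.1))).foldl
            (fun d q => d.modify q.1 [] (fun l => l ++ [q.2])) d) from by rw [List.foldl_map]]
    rw [PySem.Dict.getD_foldl_modify_append]
    simp [List.filter_map, List.map_map, Function.comp_def]

theorem getD_buildIndex (n : Int) (holes : List (List (Int × Int))) (b : List (Int × Int)) :
    (buildIndex n holes).getD b [] = candFlat n holes 0 b := by
  unfold buildIndex candFlat
  rw [getD_fold_addHole]
  simp

theorem scanB_skip (matched : PySem.Set Int) (c1 rest : List Int)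
    (h : ∀ i ∈ c1, PySem.Set.contains matched i = true) :
    scanB matched (c1 ++ rest) = scanB matched rest := by
  induction c1 with
  | nil => rfl
  | cons i c1 ih =>
    rw [List.cons_append, scanB, if_pos (h i List.mem_cons_self)]
    exact ih (fun j hj => h j (List.mem_cons_of_mem _ hj))

theorem scan_eq (n : Int) (b : List (Int × Int)) (hb : GoodS b) :
    ∀ (hs : List (List (Int × Int))) (fs : List Int) (s : Int) (matched : PySem.Set Int),
    fs.length = hs.length → (∀ h ∈ hs, GoodS h) →
    (∀ j : Nat, j < hs.length → (fs.getD j 0 = 0 ↔ (s + (j : Int)) ∉ matched)) →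
    (scanA n b hs fs = none ∧ scanB matched (candFlat n hs s b) = none) ∨
    (∃ j : Nat, j < hs.length ∧ fs.getD j 0 = 0 ∧
      scanA n b hs fs = some ((b.length : Int), fs.set j 1) ∧
      scanB matched (candFlat n hs s b) = some (s + (j : Int))) := by
  intro hs
  induction hs with
  | nil =>
    intro fs s matched hlen hgood hinv
    left
    refine ⟨?_, rfl⟩
    cases fs <;> rfl
  | cons h hs ih =>
    intro fs s matched hlen hgood hinv
    cases fs with
    | nil => simp at hlen
    | cons f fs =>
      have hlen' : fs.length = hs.length := by simpa using hlen
      have hgood' : ∀ x ∈ hs, GoodS x := fun x hx => hgood x (List.mem_cons_of_mem _ hx)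
      have hgh : GoodS h := hgood h List.mem_cons_self
      have hinv0 : f = 0 ↔ s ∉ matched := by
        have := hinv 0 (by simp)
        simpa using this
      have hinv' : ∀ j : Nat, j < hs.length →
          (fs.getD j 0 = 0 ↔ ((s + 1) + (j : Int)) ∉ matched) := by
        intro j hj
        have := hinv (j + 1) (by simp; omega)
        rw [show ((f :: fs).getD (j + 1) 0) = fs.getD j 0 from rfl] at this
        rw [show (s + 1) + (j : Int) = s + ((j : Nat) + 1 : Int) by ring]
        exact_mod_cast this
      have hcand : candFlat n (h :: hs) s b =
          (((rots4 n h).filter (fun v => v == b)).map (fun _ => s)) ++ candFlat n hs (s + 1) b := by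
        unfold candFlat
        rw [PySem.List.enumerate_cons, List.flatMap_cons]
      -- lift a recursive result through the cons
      have lift : (scanA n b hs fs = none ∧ scanB matched (candFlat n hs (s + 1) b) = none) ∨
          (∃ j : Nat, j < hs.length ∧ fs.getD j 0 = 0 ∧
            scanA n b hs fs = some ((b.length : Int), fs.set j 1) ∧
            scanB matched (candFlat n hs (s + 1) b) = some ((s + 1) + (j : Int))) →
          ((scanA n b hs fs).map (fun r => (r.1, f :: r.2)) = none ∧
            scanB matched (candFlat n hs (s + 1) b) = none) ∨
          (∃ j : Nat, j < (h :: hs).length ∧ (f :: fs).getD j 0 = 0 ∧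
            (scanA n b hs fs).map (fun r => (r.1, f :: r.2)) =
              some ((b.length : Int), (f :: fs).set j 1) ∧
            scanB matched (candFlat n hs (s + 1) b) = some (s + (j : Int))) := by
        rintro (⟨h1, h2⟩ | ⟨j, hj, hj0, h1, h2⟩)
        · left; rw [h1]; exact ⟨rfl, h2⟩
        · right
          refine ⟨j + 1, by simp; omega, by simpa using hj0, ?_, ?_⟩
          · rw [h1]; rfl
          · rw [h2]; congr 1; push_cast; ring
      by_cases hf : f = 0
      · by_cases hmem : b ∈ rots4 n h
        · -- match at this hole
          right
          refine ⟨0, by simp, by simpa using hf, ?_, ?_⟩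
          · rw [scanA, if_pos hf, tryRot_eq n hb hgh, if_pos hmem]
            rfl
          · rw [hcand]
            have hbf : b ∈ (rots4 n h).filter (fun v => v == b) :=
              List.mem_filter.mpr ⟨hmem, by simp⟩
            rcases hflt : (rots4 n h).filter (fun v => v == b) with _ | ⟨x, xs⟩
            · rw [hflt] at hbf; cases hbf
            · rw [List.map_cons, List.cons_append, scanB,
                if_neg (by
                  have hsm : s ∉ matched := hinv0.mp hf
                  simp [hsm])]
              simp
        · -- no rotation of this hole matches b
          have hflt : (rots4 n h).filter (fun v => v == b) = [] :=
            List.filter_eq_nil_iff.mpr (fun x hx => by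
              simp only [beq_iff_eq]
              rintro rfl
              exact hmem hx)
          have hrec := lift (ih fs (s + 1) matched hlen' hgood' hinv')
          rw [hcand, hflt, List.map_nil, List.nil_append]
          rw [scanA, if_pos hf, tryRot_eq n hb hgh, if_neg hmem]
          exact hrec
      · -- hole already used: A skips it, B skips all its candidate entries
        have hsm : s ∈ matched := by
          by_contra hns
          exact hf (hinv0.mpr hns)
        have hskip : scanB matched (candFlat n (h :: hs) s b) =
            scanB matched (candFlat n hs (s + 1) b) := by
          rw [hcand]
          apply scanB_skip
          intro i hi
          rcases List.mem_map.mp hi with ⟨x, _, rfl⟩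
          simp [hsm]
        have hrec := lift (ih fs (s + 1) matched hlen' hgood' hinv')
        rw [hskip]
        rw [scanA, if_neg hf]
        exact hrec

theorem fold_blocks (n : Int) (holes : List (List (Int × Int))) (hgood : ∀ h ∈ holes, GoodS h) :
    ∀ (bs : List (List (Int × Int))), (∀ b ∈ bs, GoodS b) →
    ∀ (ansA ansB : Int) (fs : List Int) (matched : PySem.Set Int),
    ansA = ansB → fs.length = holes.length →
    (∀ j : Nat, j < holes.length → (fs.getD j 0 = 0 ↔ ((j : Int)) ∉ matched)) →
    (bs.foldl (fun (st : Int × List Int) block =>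
      match scanA n block holes st.2 with
      | some r => (st.1 + r.1, r.2)
      | none => st) (ansA, fs)).1 =
    (bs.foldl (fun (st : Int × PySem.Set Int) block =>
      match scanB st.2 ((buildIndex n holes).getD block []) with
      | some i => (st.1 + (block.length : Int), PySem.Set.add st.2 i)
      | none => st) (ansB, matched)).1 := by
  intro bs
  induction bs with
  | nil =>
    intro _ ansA ansB fs matched hans _ _
    simpa using hans
  | cons blk bs ih =>
    intro hgb ansA ansB fs matched hans hlen hinv
    have hgblk : GoodS blk := hgb blk List.mem_cons_self
    have hgb' : ∀ x ∈ bs, GoodS x := fun x hx => hgb x (List.mem_cons_of_mem _ hx)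
    rw [List.foldl_cons, List.foldl_cons]
    have hinv0 : ∀ j : Nat, j < holes.length →
        (fs.getD j 0 = 0 ↔ ((0 : Int) + (j : Int)) ∉ matched) := by
      intro j hj; rw [zero_add]; exact hinv j hj
    rcases scan_eq n blk hgblk holes fs 0 matched hlen hgood hinv0 with
      ⟨hA, hB⟩ | ⟨j, hj, hj0, hA, hB⟩
    · rw [hA, getD_buildIndex, hB]
      exact ih hgb' ansA ansB fs matched hans hlen hinv
    · rw [hA, getD_buildIndex, hB]
      have hjfs : j < fs.length := by omega
      refine ih hgb' _ _ _ _ (by rw [hans]) (by simpa using hlen) ?_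
      intro k hk
      by_cases hkj : k = j
      · subst hkj
        constructor
        · intro hcon
          rw [show ((fs.set k 1).getD k 0) = 1 by
            simp [List.getD, hjfs]] at hcon
          cases hcon
        · intro hcon
          exact absurd ((PySem.Set.mem_add _ _ _).mpr (Or.inr (by rw [zero_add]))) hcon
      · rw [show ((fs.set j 1).getD k 0) = fs.getD k 0 by
          simp [List.getD, List.getElem?_set_ne (fun hx => hkj hx.symm)]]
        rw [hinv k hk]
        constructor
        · intro hkm hcon
          rcases (PySem.Set.mem_add _ _ _).mp hcon with hin | heq
          · exact hkm hin
          · rw [zero_add] at heq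
            exact hkj (by exact_mod_cast heq)
        · intro hkm hin
          exact hkm ((PySem.Set.mem_add _ _ _).mpr (Or.inl hin))

-- ===== VERDICT (by name: the statement is the Claim_ definition above) =====
theorem solution_spec : Claim_equal_solution := by
  intro game_board table _ _
  show _ = _
  unfold solution solution_alt
  exact fold_blocks _ _ (bfs_shapes _ _) _ (bfs_shapes _ _) _ _ _ _ rfl
    (by simp) (by intro j hj; simp)
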